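-- pv_equiv track=rewrite | github.com/hsien999/DetectingUrbanFlow | combine_subareas.py | count_od_number
-- ===== SOURCE A (Python) =====
-- def count_od_number(pi_type, neighbour):
--     """
--     calculate the number of od points for given neighborhood
--     """
--     o_cnt, d_cnt = 0, 0
--     for ne in neighbour:
--         for tp in pi_type[ne]:
--             if tp:
--                 o_cnt += 1
--             else:
--                 d_cnt += 1
--     return o_cnt, d_cnt
-- ===== SOURCE B (Python) =====
-- def count_od_number(pi_type, neighbour):
--     """
--     calculate the number of od points for given neighborhood
--     """
--     stats = {k: (sum(map(bool, row)), len(row)) for k, row in pi_type.items()}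
--     o_cnt, d_cnt = 0, 0
--     for ne in neighbour:
--         o, n = stats[ne]
--         o_cnt += o
--         d_cnt += n - o
--     return o_cnt, d_cnt
-- ===== Notes on version B (the rewrite author's own statement) =====
-- stated objective: alternative
-- what changed: B precomputes a per-key index (truthy count, row length) in one pass over pi_type, then a single loop over neighbour does only table lookups and arithmetic; A's per-element inner loop with if/else dual counters disappears.
import Mathlib
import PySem

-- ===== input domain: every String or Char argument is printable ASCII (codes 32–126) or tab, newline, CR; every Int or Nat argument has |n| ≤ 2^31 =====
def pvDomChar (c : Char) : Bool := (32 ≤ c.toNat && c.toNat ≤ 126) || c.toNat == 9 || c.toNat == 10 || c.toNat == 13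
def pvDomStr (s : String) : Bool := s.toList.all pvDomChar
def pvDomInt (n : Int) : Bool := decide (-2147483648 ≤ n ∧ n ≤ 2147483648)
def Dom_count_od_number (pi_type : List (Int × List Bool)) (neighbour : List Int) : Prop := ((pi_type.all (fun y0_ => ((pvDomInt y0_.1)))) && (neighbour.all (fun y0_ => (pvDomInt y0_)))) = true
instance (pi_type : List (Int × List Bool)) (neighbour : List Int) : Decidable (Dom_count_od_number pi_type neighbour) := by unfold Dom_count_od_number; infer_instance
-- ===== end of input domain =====

-- B precomputes a per-key (truthy count, row length) index in one pass over pi_type, then a single lookup-and-arithmetic loop over neighbour replaces A's per-element if/else inner loop (alternative decomposition, same cost).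


-- ===== PORT A =====
-- Python dict lookup pi_type[ne] (first match on the association list); none = KeyError, excluded by Pre_
def dictGet? (d : List (Int × List Bool)) (k : Int) : Option (List Bool) :=
  match d with
  | [] => none
  | (a, b) :: rest => if a == k then some b else dictGet? rest k

-- literal transliteration of A: two counters, nested loops, if/else on each element
def count_od_number (pi_type : List (Int × List Bool)) (neighbour : List Int) : Int × Int :=
  neighbour.foldl
    (fun acc ne =>
      ((dictGet? pi_type ne).getD []).foldl
        (fun acc tp => if tp then (acc.1 + 1, acc.2) else (acc.1, acc.2 + 1)) acc)
    (0, 0)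

-- ===== PORT B =====
-- stats lookup on the precomputed index (first match); none = KeyError, excluded by Pre_
def statsGet? (d : List (Int × (Int × Int))) (k : Int) : Option (Int × Int) :=
  match d with
  | [] => none
  | (a, b) :: rest => if a == k then some b else statsGet? rest k

-- literal transliteration of B: build the per-key (truthy count, length) index once,
-- then one loop over neighbour doing lookups and arithmetic only
def count_od_number_alt (pi_type : List (Int × List Bool)) (neighbour : List Int) : Int × Int :=
  let stats : List (Int × (Int × Int)) :=
    pi_type.map (fun kv => (kv.1, ((kv.2.count true : Int), (kv.2.length : Int))))
  neighbour.foldl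
    (fun acc ne =>
      let p := (statsGet? stats ne).getD (0, 0)
      (acc.1 + p.1, acc.2 + (p.2 - p.1)))
    (0, 0)

-- ===== PRECONDITION & SPEC =====
-- Pre_ excludes exactly the inputs where Python raises KeyError: some neighbour id missing from pi_type's keys
def Pre_count_od_number (pi_type : List (Int × List Bool)) (neighbour : List Int) : Prop :=
  ∀ ne ∈ neighbour, ne ∈ pi_type.map Prod.fst
instance (pi_type : List (Int × List Bool)) (neighbour : List Int) : Decidable (Pre_count_od_number pi_type neighbour) := by unfold Pre_count_od_number; infer_instance
def pvWitness_count_od_number : (List (Int × List Bool)) × List Int :=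
  ([(0, [true, false]), (1, []), (2, [false, false, true])], [0, 2, 2])

def Spec_count_od_number (pi_type : List (Int × List Bool)) (neighbour : List Int) (out : Int × Int) : Prop := out = count_od_number_alt pi_type neighbour
instance (pi_type : List (Int × List Bool)) (neighbour : List Int) (out : Int × Int) : Decidable (Spec_count_od_number pi_type neighbour out) := by unfold Spec_count_od_number; infer_instance

-- ===== CLAIM (what is proved, stated in full; the proofs are below) =====
def Claim_equal_count_od_number : Prop := ∀ (pi_type : List (Int × List Bool)) (neighbour : List Int), Dom_count_od_number pi_type neighbour → Pre_count_od_number pi_type neighbour → Spec_count_od_number pi_type neighbour (count_od_number pi_type neighbour)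

-- ===== LEMMAS AND PROOFS =====

-- looking a key up in the mapped index = mapping the row lookup
lemma statsGet_map (pi_type : List (Int × List Bool)) (k : Int) :
    statsGet? (pi_type.map (fun kv => (kv.1, ((kv.2.count true : Int), (kv.2.length : Int))))) k
      = (dictGet? pi_type k).map (fun row => ((row.count true : Int), (row.length : Int))) := by
  induction pi_type with
  | nil => rfl
  | cons h t ih => simp [statsGet?, dictGet?, ih]; split <;> simp

-- A's inner loop from state (o, d) adds (count true, len - count true)
lemma inner_fold (l : List Bool) (o d : Int) :
    l.foldl (fun acc tp => if tp then (acc.1 + 1, acc.2) else (acc.1, acc.2 + 1)) (o, d)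
      = (o + (l.count true : Int), d + ((l.length : Int) - (l.count true : Int))) := by
  induction l generalizing o d with
  | nil => simp
  | cons b t ih => cases b <;> simp [ih] <;> ring_nf

-- the two outer folds agree from any starting state
lemma outer_fold (pi_type : List (Int × List Bool)) (ns : List Int) (acc : Int × Int) :
    ns.foldl
      (fun acc ne =>
        ((dictGet? pi_type ne).getD []).foldl
          (fun acc tp => if tp then (acc.1 + 1, acc.2) else (acc.1, acc.2 + 1)) acc)
      acc
    = ns.foldl
        (fun acc ne =>
          let p := (statsGet? (pi_type.map (fun kv => (kv.1, ((kv.2.count true : Int), (kv.2.length : Int))))) ne).getD (0, 0)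
          (acc.1 + p.1, acc.2 + (p.2 - p.1)))
        acc := by
  induction ns generalizing acc with
  | nil => rfl
  | cons n t ih =>
    obtain ⟨o, d⟩ := acc
    simp only [List.foldl_cons]
    rw [ih]
    congr 1
    rw [statsGet_map, inner_fold]
    cases h : dictGet? pi_type n <;> simp

theorem count_od_number_spec : Claim_equal_count_od_number := by
  intro pi_type neighbour _ _
  unfold Spec_count_od_number count_od_number count_od_number_alt
  exact outer_fold _ _ _
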